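-- pv_equiv track=rewrite | github.com/jcolinpatrick/kryptos | scripts/transposition/other/e_s_55_grid_route_sweep.py | diagonal_perm
-- ===== SOURCE A (Python) =====
-- def diagonal_perm(rows, cols, length=97, direction="tl_br"):
--     """Diagonal reading. direction: tl_br (top-left to bottom-right),
--     tr_bl (top-right to bottom-left)."""
--     perm = []
--     if direction == "tl_br":
--         for d in range(rows + cols - 1):
--             for r in range(max(0, d - cols + 1), min(d + 1, rows)):
--                 c = d - r
--                 pos = r * cols + c
--                 if pos < length:
--                     perm.append(pos)
--     else:  # tr_bl
--         for d in range(rows + cols - 1):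
--             for r in range(max(0, d - cols + 1), min(d + 1, rows)):
--                 c = cols - 1 - (d - r)
--                 pos = r * cols + c
--                 if pos < length:
--                     perm.append(pos)
--     return perm
-- ===== SOURCE B (Python) =====
-- def diagonal_perm(rows, cols, length=97, direction="tl_br"):
--     """Diagonal reading. direction: tl_br (top-left to bottom-right),
--     tr_bl (top-right to bottom-left)."""
--     cells = []
--     for r in range(rows):
--         for c in range(cols):
--             pos = r * cols + c
--             if pos < length:
--                 diag = r + c if direction == "tl_br" else r + (cols - 1 - c)
--                 cells.append(((diag, r), pos))
--     cells.sort(key=lambda cell: cell[0])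
--     return [pos for _, pos in cells]
-- ===== Notes on version B (the rewrite author's own statement) =====
-- stated objective: alternative
-- what changed: Replaces A's diagonal-by-diagonal nested loops with explicitly computed range boundaries by a plain row-major scan that tags each kept cell with its (diagonal, row) key and then stable-sorts the cells by that key.
import Mathlib
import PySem

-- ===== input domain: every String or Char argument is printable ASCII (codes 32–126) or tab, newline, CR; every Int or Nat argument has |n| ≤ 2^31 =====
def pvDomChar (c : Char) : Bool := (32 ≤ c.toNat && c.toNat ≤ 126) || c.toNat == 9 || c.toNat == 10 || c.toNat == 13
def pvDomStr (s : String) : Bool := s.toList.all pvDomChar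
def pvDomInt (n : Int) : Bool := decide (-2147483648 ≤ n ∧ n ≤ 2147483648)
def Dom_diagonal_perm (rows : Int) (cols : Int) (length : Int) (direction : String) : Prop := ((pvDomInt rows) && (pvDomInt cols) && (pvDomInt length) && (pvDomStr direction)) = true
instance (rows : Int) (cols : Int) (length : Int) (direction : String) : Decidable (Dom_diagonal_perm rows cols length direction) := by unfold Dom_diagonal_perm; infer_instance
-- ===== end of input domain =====

-- B replaces A's diagonal-by-diagonal nested loops (with computed range boundaries) by a
-- row-major scan that keys each kept cell with (diagonal, row) and stable-sorts by that key
-- (objective: alternative decomposition, same result).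

-- ===== PORT A =====
def diagonal_perm (rows : Int) (cols : Int) (length : Int) (direction : String) : List Int :=
  if direction = "tl_br" then
    (PySem.List.pyRange 0 (rows + cols - 1) 1).foldl (fun perm d =>
      (PySem.List.pyRange (max 0 (d - cols + 1)) (min (d + 1) rows) 1).foldl (fun perm r =>
        let c := d - r
        let pos := r * cols + c
        if pos < length then perm ++ [pos] else perm) perm) []
  else  -- tr_bl
    (PySem.List.pyRange 0 (rows + cols - 1) 1).foldl (fun perm d =>
      (PySem.List.pyRange (max 0 (d - cols + 1)) (min (d + 1) rows) 1).foldl (fun perm r =>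
        let c := cols - 1 - (d - r)
        let pos := r * cols + c
        if pos < length then perm ++ [pos] else perm) perm) []

-- ===== PORT B =====
def diagonal_perm_alt (rows : Int) (cols : Int) (length : Int) (direction : String) : List Int :=
  let cells :=
    (PySem.List.pyRange 0 rows 1).foldl (fun cells r =>
      (PySem.List.pyRange 0 cols 1).foldl (fun cells c =>
        let pos := r * cols + c
        if pos < length then
          let diag := if direction = "tl_br" then r + c else r + (cols - 1 - c)
          cells ++ [((diag, r), pos)]
        else cells) cells) []
  (PySem.List.sorted2 cells (fun cell => cell.1.1) (fun cell => cell.1.2)).map (fun cell => cell.2)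

-- ===== PRECONDITION & SPEC =====
def Spec_diagonal_perm (rows : Int) (cols : Int) (length : Int) (direction : String) (out : List Int) : Prop := out = diagonal_perm_alt rows cols length direction
instance (rows : Int) (cols : Int) (length : Int) (direction : String) (out : List Int) : Decidable (Spec_diagonal_perm rows cols length direction out) := by unfold Spec_diagonal_perm; infer_instance

-- ===== CLAIM (what is proved, stated in full; the proofs are below) =====
def Claim_equal_diagonal_perm : Prop := ∀ (rows : Int) (cols : Int) (length : Int) (direction : String), Dom_diagonal_perm rows cols length direction → Spec_diagonal_perm rows cols length direction (diagonal_perm rows cols length direction)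

-- ===== LEMMAS AND PROOFS =====

-- A's traversal, as a flatMap of diagonal segments of ((d, r), pos) cells; cOf gives c from (d, r).
def pvDiagCells (rows cols length : Int) (cOf : Int → Int → Int) : List ((Int × Int) × Int) :=
  (PySem.List.pyRange 0 (rows + cols - 1) 1).flatMap (fun d =>
    ((PySem.List.pyRange (max 0 (d - cols + 1)) (min (d + 1) rows) 1).filter
      (fun r => decide (r * cols + cOf d r < length))).map
      (fun r => ((d, r), r * cols + cOf d r)))

-- B's traversal, as a flatMap of row segments of ((d, r), pos) cells; dOf gives d from (r, c).
def pvRowCells (rows cols length : Int) (dOf : Int → Int → Int) : List ((Int × Int) × Int) :=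
  (PySem.List.pyRange 0 rows 1).flatMap (fun r =>
    ((PySem.List.pyRange 0 cols 1).filter (fun c => decide (r * cols + c < length))).map
      (fun c => ((dOf r c, r), r * cols + c)))

theorem pvFoldl_append_if {α β : Type} (P : α → Prop) [DecidablePred P] (f : α → β)
    (l : List α) (acc : List β) :
    List.foldl (fun acc x => if P x then acc ++ [f x] else acc) acc l
      = acc ++ (l.filter (fun x => decide (P x))).map f := by
  have h := PySem.List.foldl_append_if (fun x => decide (P x)) f l acc
  simpa using h

theorem pvA_branch (rows cols length : Int) (cOf : Int → Int → Int) :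
    (PySem.List.pyRange 0 (rows + cols - 1) 1).foldl (fun perm d =>
      (PySem.List.pyRange (max 0 (d - cols + 1)) (min (d + 1) rows) 1).foldl (fun perm r =>
        if r * cols + cOf d r < length then perm ++ [r * cols + cOf d r] else perm) perm) []
      = (pvDiagCells rows cols length cOf).map (fun cell => cell.2) := by
  have h1 : (fun (perm : List Int) d =>
      (PySem.List.pyRange (max 0 (d - cols + 1)) (min (d + 1) rows) 1).foldl (fun perm r =>
        if r * cols + cOf d r < length then perm ++ [r * cols + cOf d r] else perm) perm)
      = (fun (perm : List Int) d => perm ++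
          ((PySem.List.pyRange (max 0 (d - cols + 1)) (min (d + 1) rows) 1).filter
            (fun r => decide (r * cols + cOf d r < length))).map (fun r => r * cols + cOf d r)) := by
    funext perm d
    exact pvFoldl_append_if _ _ _ _
  rw [h1, PySem.List.foldl_append_eq_flatMap]
  simp [pvDiagCells, List.map_flatMap, List.map_map, Function.comp_def]

theorem pvB_branch (rows cols length : Int) (dOf : Int → Int → Int) :
    (PySem.List.pyRange 0 rows 1).foldl (fun cells r =>
      (PySem.List.pyRange 0 cols 1).foldl (fun cells c =>
        if r * cols + c < length then cells ++ [((dOf r c, r), r * cols + c)] else cells) cells) []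
      = pvRowCells rows cols length dOf := by
  have h1 : (fun (cells : List ((Int × Int) × Int)) r =>
      (PySem.List.pyRange 0 cols 1).foldl (fun cells c =>
        if r * cols + c < length then cells ++ [((dOf r c, r), r * cols + c)] else cells) cells)
      = (fun (cells : List ((Int × Int) × Int)) r => cells ++
          ((PySem.List.pyRange 0 cols 1).filter (fun c => decide (r * cols + c < length))).map
            (fun c => ((dOf r c, r), r * cols + c))) := by
    funext cells r
    exact pvFoldl_append_if _ _ _ _
  rw [h1, PySem.List.foldl_append_eq_flatMap]
  simp [pvRowCells]

theorem pvPairwise_lt_pyRange (a b : Int) : List.Pairwise (· < ·) (PySem.List.pyRange a b 1) := by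
  rw [PySem.List.pyRange_of_pos a b Int.one_pos]
  rw [List.pairwise_map]
  refine List.pairwise_lt_range.imp ?_
  intro k1 k2 h
  omega

-- sorted2 with the two key components is sorting by the lexicographic pair key
theorem pvSorted2_eq_sorted_lex (xs : List ((Int × Int) × Int)) :
    PySem.List.sorted2 xs (fun x => x.1.1) (fun x => x.1.2)
      = PySem.List.sorted xs (fun x => toLex x.1) := by
  show List.foldl _ [] xs = List.foldl _ [] xs
  have hb : (fun (a b : (Int × Int) × Int) =>
        decide (a.1.1 < b.1.1) || (!decide (b.1.1 < a.1.1) && decide (a.1.2 < b.1.2)))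
      = (fun (a b : (Int × Int) × Int) => decide (toLex a.1 < toLex b.1)) := by
    funext a b
    rcases lt_trichotomy a.1.1 b.1.1 with h | h | h
    · simp [h, Prod.Lex.lt_iff, not_lt.mpr (le_of_lt h)]
    · simp [h, Prod.Lex.lt_iff]
    · simp [not_lt.mpr (le_of_lt h), h, Prod.Lex.lt_iff, (ne_of_gt h)]
  simp only [Bool.false_eq_true, if_false]
  rw [hb]

theorem pvDiag_pairwise (rows cols length : Int) (cOf : Int → Int → Int) :
    (pvDiagCells rows cols length cOf).Pairwise
      (fun a b => (toLex a.1 : Lex (Int × Int)) < toLex b.1) := by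
  unfold pvDiagCells
  rw [List.pairwise_flatMap]
  constructor
  · intro d _
    rw [List.pairwise_map]
    refine ((pvPairwise_lt_pyRange _ _).filter _).imp ?_
    intro r1 r2 h
    exact Prod.Lex.lt_iff.mpr (Or.inr ⟨rfl, h⟩)
  · refine (pvPairwise_lt_pyRange _ _).imp ?_
    intro d1 d2 h x hx y hy
    obtain ⟨r1, _, rfl⟩ := List.mem_map.mp hx
    obtain ⟨r2, _, rfl⟩ := List.mem_map.mp hy
    exact Prod.Lex.lt_iff.mpr (Or.inl h)

theorem pvDiag_nodup (rows cols length : Int) (cOf : Int → Int → Int) :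
    (pvDiagCells rows cols length cOf).Nodup := by
  refine (pvDiag_pairwise rows cols length cOf).imp ?_
  intro a b h heq
  rw [heq] at h
  exact lt_irrefl _ h

theorem pvRow_nodup (rows cols length : Int) (dOf : Int → Int → Int) :
    (pvRowCells rows cols length dOf).Nodup := by
  unfold pvRowCells
  rw [List.Nodup, List.pairwise_flatMap]
  constructor
  · intro r _
    rw [List.pairwise_map]
    refine ((pvPairwise_lt_pyRange _ _).filter _).imp ?_
    intro c1 c2 h heq
    simp only [Prod.mk.injEq] at heq
    omega
  · refine (pvPairwise_lt_pyRange _ _).imp ?_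
    intro r1 r2 h x hx y hy heq
    obtain ⟨c1, _, rfl⟩ := List.mem_map.mp hx
    obtain ⟨c2, _, rfl⟩ := List.mem_map.mp hy
    simp only [Prod.mk.injEq] at heq
    omega

theorem pvPerm (rows cols length : Int) (cOf dOf : Int → Int → Int)
    (hdt : ∀ d r, 0 ≤ d → d < rows + cols - 1 → max 0 (d - cols + 1) ≤ r → r < min (d + 1) rows →
      0 ≤ cOf d r ∧ cOf d r < cols ∧ dOf r (cOf d r) = d)
    (hrt : ∀ r c, 0 ≤ r → r < rows → 0 ≤ c → c < cols →
      0 ≤ dOf r c ∧ dOf r c < rows + cols - 1 ∧ cOf (dOf r c) r = c ∧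
        max 0 (dOf r c - cols + 1) ≤ r ∧ r < min (dOf r c + 1) rows) :
    (pvDiagCells rows cols length cOf).Perm (pvRowCells rows cols length dOf) := by
  refine List.perm_of_nodup_nodup_toFinset_eq (pvDiag_nodup _ _ _ _) (pvRow_nodup _ _ _ _) ?_
  ext x
  simp only [List.mem_toFinset, pvDiagCells, pvRowCells, List.mem_flatMap, List.mem_map,
    List.mem_filter, PySem.List.mem_pyRange_one, decide_eq_true_eq]
  constructor
  · rintro ⟨d, ⟨hd0, hd1⟩, r, ⟨⟨hr1, hr2⟩, hlen⟩, rfl⟩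
    obtain ⟨hc0, hc1, hback⟩ := hdt d r hd0 hd1 hr1 hr2
    refine ⟨r, ⟨by omega, by omega⟩, cOf d r, ⟨⟨⟨hc0, hc1⟩, hlen⟩, ?_⟩⟩
    rw [hback]
  · rintro ⟨r, ⟨hr0, hr1⟩, c, ⟨⟨⟨hc0, hc1⟩, hlen⟩, rfl⟩⟩
    obtain ⟨hd0, hd1, hback, hb1, hb2⟩ := hrt r c hr0 hr1 hc0 hc1
    refine ⟨dOf r c, ⟨hd0, hd1⟩, r, ⟨⟨⟨hb1, hb2⟩, ?_⟩, ?_⟩⟩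
    · rw [hback]; exact hlen
    · rw [hback]

theorem pvMain (rows cols length : Int) (cOf dOf : Int → Int → Int)
    (hdt : ∀ d r, 0 ≤ d → d < rows + cols - 1 → max 0 (d - cols + 1) ≤ r → r < min (d + 1) rows →
      0 ≤ cOf d r ∧ cOf d r < cols ∧ dOf r (cOf d r) = d)
    (hrt : ∀ r c, 0 ≤ r → r < rows → 0 ≤ c → c < cols →
      0 ≤ dOf r c ∧ dOf r c < rows + cols - 1 ∧ cOf (dOf r c) r = c ∧
        max 0 (dOf r c - cols + 1) ≤ r ∧ r < min (dOf r c + 1) rows) :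
    (PySem.List.sorted2 (pvRowCells rows cols length dOf)
        (fun x => x.1.1) (fun x => x.1.2)).map (fun cell => cell.2)
      = (pvDiagCells rows cols length cOf).map (fun cell => cell.2) := by
  rw [pvSorted2_eq_sorted_lex]
  rw [PySem.List.sorted_eq_of_perm_of_pairwise_lt _ (pvDiagCells rows cols length cOf) _
    (pvPerm rows cols length cOf dOf hdt hrt) (pvDiag_pairwise rows cols length cOf)]

-- ===== VERDICT (by name: the statement is the Claim_ definition above) =====
theorem diagonal_perm_spec : Claim_equal_diagonal_perm := by
  intro rows cols length direction _
  unfold Spec_diagonal_perm diagonal_perm diagonal_perm_alt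
  by_cases h : direction = "tl_br"
  · simp only [h, if_true]
    rw [pvB_branch rows cols length (fun r c => r + c)]
    rw [pvA_branch rows cols length (fun d r => d - r)]
    rw [pvMain rows cols length (fun d r => d - r) (fun r c => r + c)
      (by intro d r h1 h2 h3 h4; beta_reduce; omega) (by intro r c h1 h2 h3 h4; beta_reduce; omega)]
  · simp only [h, if_false]
    rw [pvB_branch rows cols length (fun r c => r + (cols - 1 - c))]
    rw [pvA_branch rows cols length (fun d r => cols - 1 - (d - r))]
    rw [pvMain rows cols length (fun d r => cols - 1 - (d - r)) (fun r c => r + (cols - 1 - c))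
      (by intro d r h1 h2 h3 h4; beta_reduce; omega) (by intro r c h1 h2 h3 h4; beta_reduce; omega)]
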